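-- pv_equiv track=rewrite | github.com/jcolinpatrick/kryptos | scripts/grille/e_unscramble_02_correct_mask.py | vbeau
-- ===== SOURCE A (Python) =====
-- AZ  = 'ABCDEFGHIJKLMNOPQRSTUVWXYZ'
--
-- def _kv(key, alpha):
--     return [alpha.index(k) for k in key if k in alpha]
--
-- def vbeau(ct, key, alpha=AZ):
--     kv = _kv(key, alpha); n = len(alpha)
--     if not kv: return ''
--     out=[]; ki=0
--     for c in ct:
--         if c in alpha: out.append(alpha[(alpha.index(c)+kv[ki%len(kv)])%n]); ki+=1
--         else: out.append(c)
--     return ''.join(out)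
-- ===== SOURCE B (Python) =====
-- AZ  = 'ABCDEFGHIJKLMNOPQRSTUVWXYZ'
--
-- def vbeau(ct, key, alpha=AZ):
--     kv = [alpha.index(k) for k in key if k in alpha]
--     if not kv:
--         return ''
--     n, m = len(alpha), len(kv)
--     letters = [c for c in ct if c in alpha]
--     enc = iter(alpha[(alpha.index(c) + kv[i % m]) % n] for i, c in enumerate(letters))
--     return ''.join(next(enc) if c in alpha else c for c in ct)
-- ===== Notes on version B (the rewrite author's own statement) =====
-- stated objective: alternative
-- what changed: A encrypts in one fused loop carrying an output buffer and a key counter; B first filters out the alphabetic characters, encrypts that compact list positionally (i-th letter shifted by kv[i % len(kv)]), then weaves the encrypted letters back into the original text in a final pass.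
import Mathlib
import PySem

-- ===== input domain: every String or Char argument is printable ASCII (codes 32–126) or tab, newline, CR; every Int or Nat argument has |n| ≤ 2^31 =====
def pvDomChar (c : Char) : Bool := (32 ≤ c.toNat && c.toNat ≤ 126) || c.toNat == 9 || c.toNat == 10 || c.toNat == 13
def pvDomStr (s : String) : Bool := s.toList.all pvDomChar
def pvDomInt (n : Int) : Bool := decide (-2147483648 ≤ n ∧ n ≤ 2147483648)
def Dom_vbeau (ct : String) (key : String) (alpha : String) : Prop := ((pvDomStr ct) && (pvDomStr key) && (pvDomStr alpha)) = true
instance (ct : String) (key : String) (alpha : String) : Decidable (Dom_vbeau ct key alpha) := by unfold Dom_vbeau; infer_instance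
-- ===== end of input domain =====

-- B restructures A's single fused loop into three passes (filter letters, encrypt positionally, weave back); same cost, alternative shape.

-- ===== PORT A =====
-- one fused loop: accumulate output chars and the key counter ki together.
-- alpha.index(c) is guarded by `c in alpha`, so `.getD 0` is never the default;
-- `% n` has n > 0 whenever the loop runs (kv ≠ [] forces alpha ≠ []).
def vbeau (ct : String) (key : String) (alpha : String) : String :=
  let al := alpha.toList
  let kv := key.toList.filterMap (fun k => PySem.List.index? al k)
  let n := al.length
  if kv = [] then ""
  else
    String.mk (ct.toList.foldl
      (fun (s : List Char × Nat) (c : Char) =>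
        if al.contains c then
          (s.1 ++ [al.getD (((PySem.List.index? al c).getD 0 + kv.getD (s.2 % kv.length) 0) % n) ' '], s.2 + 1)
        else
          (s.1 ++ [c], s.2))
      ([], 0)).1

-- ===== PORT B =====
-- weave: emit the next encrypted letter where the original char is alphabetic, else the char itself.
def pvWeave (al : List Char) : List Char → List Char → List Char
  | [], _ => []
  | c :: cs, enc =>
    if al.contains c then
      match enc with
      | e :: es => e :: pvWeave al cs es
      | [] => c :: pvWeave al cs []   -- unreachable: enc always has one letter per alphabetic char
    else
      c :: pvWeave al cs enc

def vbeau_alt (ct : String) (key : String) (alpha : String) : String :=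
  let al := alpha.toList
  let kv := key.toList.filterMap (fun k => PySem.List.index? al k)
  if kv = [] then ""
  else
    let n := al.length
    let m := kv.length
    let letters := ct.toList.filter (fun c => al.contains c)
    let enc := (letters.zipIdx).map
      (fun p => al.getD (((PySem.List.index? al p.1).getD 0 + kv.getD (p.2 % m) 0) % n) ' ')
    String.mk (pvWeave al ct.toList enc)

-- ===== PRECONDITION & SPEC =====
def Spec_vbeau (ct : String) (key : String) (alpha : String) (out : String) : Prop := out = vbeau_alt ct key alpha
instance (ct : String) (key : String) (alpha : String) (out : String) : Decidable (Spec_vbeau ct key alpha out) := by unfold Spec_vbeau; infer_instance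

-- ===== CLAIM (what is proved, stated in full; the proofs are below) =====
def Claim_equal_vbeau : Prop := ∀ (ct : String) (key : String) (alpha : String), Dom_vbeau ct key alpha → Spec_vbeau ct key alpha (vbeau ct key alpha)

-- ===== LEMMAS AND PROOFS =====

-- the loop of A, starting at key counter ki with accumulator acc, produces acc
-- followed by the weave of cs with the letters of cs encrypted positionally from ki.
theorem pv_loop_eq (al : List Char) (kv : List Nat) (n : Nat)
    (cs : List Char) (acc : List Char) (ki : Nat) :
    (cs.foldl
      (fun (s : List Char × Nat) (c : Char) =>
        if al.contains c then
          (s.1 ++ [al.getD (((PySem.List.index? al c).getD 0 + kv.getD (s.2 % kv.length) 0) % n) ' '], s.2 + 1)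
        else
          (s.1 ++ [c], s.2))
      (acc, ki)).1
    = acc ++ pvWeave al cs
        (((cs.filter (fun c => al.contains c)).zipIdx ki).map
          (fun p => al.getD (((PySem.List.index? al p.1).getD 0 + kv.getD (p.2 % kv.length) 0) % n) ' ')) := by
  induction cs generalizing acc ki with
  | nil => simp [pvWeave]
  | cons c cs ih =>
    by_cases h : al.contains c
    · simp only [List.foldl_cons, List.filter_cons, h, if_pos, List.zipIdx_cons, List.map_cons,
        pvWeave, ih]
      simp
    · simp only [List.foldl_cons, List.filter_cons, h, if_neg, Bool.false_eq_true,
        not_false_iff, pvWeave, ih]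
      simp

-- ===== VERDICT (by name: the statement is the Claim_ definition above) =====
theorem vbeau_spec : Claim_equal_vbeau := by
  intro ct key alpha _
  simp only [Spec_vbeau, vbeau, vbeau_alt]
  by_cases hkv : key.toList.filterMap (fun k => PySem.List.index? alpha.toList k) = []
  · rw [if_pos hkv, if_pos hkv]
  · rw [if_neg hkv, if_neg hkv, pv_loop_eq, List.nil_append]
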